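-- pv_equiv track=rewrite | github.com/alan-turing-institute/room2glo | evaluation/examine_neighborhoods.py | get_time_slices
-- ===== SOURCE A (Python) =====
-- def get_time_slices(start_year,end_year,start_month,end_month,step_size):
-- 	time_slices = []
-- 	i = 1
-- 	for year in range(start_year,end_year+1):
-- 		for month in range(1,13):
--
-- 			if year == start_year and month < start_month:
-- 				continue
-- 			elif year == end_year and month > end_month:
-- 				break
-- 			elif i == 1:
-- 				month1 = "{}-{:02}".format(year,month)
--
--
-- 			if i == step_size:
-- 				month2 = "{}-{:02}".format(year,month)
-- 				time_slices.append(month1+"_"+month2)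
--
-- 				i = 1
-- 			else:
-- 				i += 1
-- 	return time_slices
-- ===== SOURCE B (Python) =====
-- def get_time_slices(start_year, end_year, start_month, end_month, step_size):
--     months = []
--     for year in range(start_year, end_year + 1):
--         for month in range(1, 13):
--             if year == start_year and month < start_month:
--                 continue
--             if year == end_year and month > end_month:
--                 break
--             months.append("{}-{:02}".format(year, month))
--     if step_size < 1:
--         return []
--     return [months[j] + "_" + months[j + step_size - 1]
--             for j in range(0, len(months) - step_size + 1, step_size)]
-- ===== Notes on version B (the rewrite author's own statement) =====
-- stated objective: alternative
-- what changed: A's single counter-driven pass (state i/month1 threaded through every month) is replaced by a two-phase decomposition: first collect the flat list of valid YYYY-MM labels, then chunk it by index arithmetic with a stepped range, pairing months[j] with months[j+step_size-1].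
import Mathlib
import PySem

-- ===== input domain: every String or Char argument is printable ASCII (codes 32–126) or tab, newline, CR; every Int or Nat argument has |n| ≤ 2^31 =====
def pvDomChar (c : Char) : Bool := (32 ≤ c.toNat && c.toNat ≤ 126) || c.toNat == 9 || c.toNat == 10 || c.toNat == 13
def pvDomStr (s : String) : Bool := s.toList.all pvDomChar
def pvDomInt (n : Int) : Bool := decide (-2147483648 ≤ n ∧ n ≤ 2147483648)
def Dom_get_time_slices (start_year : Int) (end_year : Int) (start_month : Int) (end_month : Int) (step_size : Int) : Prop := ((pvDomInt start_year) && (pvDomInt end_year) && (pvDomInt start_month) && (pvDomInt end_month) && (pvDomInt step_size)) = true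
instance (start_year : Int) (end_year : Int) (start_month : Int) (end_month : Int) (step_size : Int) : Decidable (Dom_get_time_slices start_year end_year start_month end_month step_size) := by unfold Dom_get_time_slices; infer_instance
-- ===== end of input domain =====

-- B replaces A's single counter-driven pass (state i/month1 threaded through every month)
-- by a two-phase decomposition: first collect the flat list of valid YYYY-MM labels, then
-- chunk it by index arithmetic with a stepped range; objective: alternative decomposition.

-- ===== PORT A =====
-- '"{}-{:02}".format(year, month)': exact here because month is always in 1..12 (the
-- inner range), so zero-padding to width 2 is exactly one leading '0' when month < 10.
def pvFmtYM (year : Int) (month : Int) : String :=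
  PySem.Int.toStr year ++ "-" ++
    (if month < 10 then "0" ++ PySem.Int.toStr month else PySem.Int.toStr month)

-- inner 'for month in range(1,13)' loop of A, with its continue/break, threading the
-- state (i, month1, time_slices); time_slices is held in reverse (Python's append to
-- the end = cons here, reversed once at the end) so each append is O(1).
-- 'month1' starts as "" but is never read before being assigned (i == step_size is
-- only reachable after an i == 1 iteration assigned it).
def pvAInner (start_year : Int) (end_year : Int) (start_month : Int) (end_month : Int)
    (step_size : Int) (year : Int) :
    List Int → (Int × String × List String) → (Int × String × List String)
  | [], st => st
  | month :: rest, (i, month1, rev_slices) =>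
      if year = start_year ∧ month < start_month then
        pvAInner start_year end_year start_month end_month step_size year rest
          (i, month1, rev_slices)
      else if year = end_year ∧ month > end_month then
        (i, month1, rev_slices)   -- break
      else
        let month1' := if i = 1 then pvFmtYM year month else month1
        if i = step_size then
          pvAInner start_year end_year start_month end_month step_size year rest
            (1, month1', (month1' ++ "_" ++ pvFmtYM year month) :: rev_slices)
        else
          pvAInner start_year end_year start_month end_month step_size year rest
            (i + 1, month1', rev_slices)

def get_time_slices (start_year : Int) (end_year : Int) (start_month : Int) (end_month : Int) (step_size : Int) : List String :=
  ((PySem.List.pyRange start_year (end_year + 1) 1).foldl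
      (fun st year => pvAInner start_year end_year start_month end_month step_size year
        (PySem.List.pyRange 1 13 1) st)
      ((1 : Int), "", ([] : List String))).2.2.reverse

-- ===== PORT B =====
-- inner 'for month in range(1,13)' loop of Source B: collect this year's valid month
-- labels in order (continue = skip, break = stop).
def pvBMonths (start_year : Int) (end_year : Int) (start_month : Int) (end_month : Int)
    (year : Int) : List Int → List String
  | [] => []
  | month :: rest =>
      if year = start_year ∧ month < start_month then
        pvBMonths start_year end_year start_month end_month year rest
      else if year = end_year ∧ month > end_month then []   -- break
      else pvFmtYM year month :: pvBMonths start_year end_year start_month end_month year rest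

-- Source B's 'months' list: all valid labels, year by year in order (the year loop only
-- ever appends at the end, so it is the concatenation of the per-year lists).
def pvBAllMonths (start_year : Int) (end_year : Int) (start_month : Int) (end_month : Int) : List String :=
  (PySem.List.pyRange start_year (end_year + 1) 1).flatMap
    (fun y => pvBMonths start_year end_year start_month end_month y
      (PySem.List.pyRange 1 13 1))

-- 'months[j]' is ported as pyGetD with default "": every index the stepped range
-- produces is in bounds, so the default is never read.
def get_time_slices_alt (start_year : Int) (end_year : Int) (start_month : Int) (end_month : Int) (step_size : Int) : List String :=
  if step_size < 1 then []
  else (PySem.List.pyRange 0 (PySem.List.len (pvBAllMonths start_year end_year start_month end_month) - step_size + 1) step_size).map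
    (fun j => PySem.List.pyGetD (pvBAllMonths start_year end_year start_month end_month) j "" ++ "_" ++
      PySem.List.pyGetD (pvBAllMonths start_year end_year start_month end_month) (j + step_size - 1) "")

-- ===== PRECONDITION & SPEC =====
def Spec_get_time_slices (start_year : Int) (end_year : Int) (start_month : Int) (end_month : Int) (step_size : Int) (out : List String) : Prop := out = get_time_slices_alt start_year end_year start_month end_month step_size
instance (start_year : Int) (end_year : Int) (start_month : Int) (end_month : Int) (step_size : Int) (out : List String) : Decidable (Spec_get_time_slices start_year end_year start_month end_month step_size out) := by unfold Spec_get_time_slices; infer_instance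

-- ===== CLAIM (what is proved, stated in full; the proofs are below) =====
def Claim_equal_get_time_slices : Prop := ∀ (start_year : Int) (end_year : Int) (start_month : Int) (end_month : Int) (step_size : Int), Dom_get_time_slices start_year end_year start_month end_month step_size → Spec_get_time_slices start_year end_year start_month end_month step_size (get_time_slices start_year end_year start_month end_month step_size)

-- ===== LEMMAS AND PROOFS =====

-- A's per-month state transition, abstracted to the stream of formatted month strings.
def pvStepA (s : Int) : (Int × String × List String) → List String → (Int × String × List String)
  | st, [] => st
  | (i, m1, acc), x :: rest =>
      let m1' := if i = 1 then x else m1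
      if i = s then pvStepA s (1, m1', (m1' ++ "_" ++ x) :: acc) rest
      else pvStepA s (i + 1, m1', acc) rest

-- reference chunking: first_last label of each complete block of r elements.
def pvChunks (r : Nat) (L : List String) : List String :=
  if _h : 0 < r ∧ r ≤ L.length then
    (L.headI ++ "_" ++ L.getD (r - 1) "") :: pvChunks r (L.drop r)
  else []
  termination_by L.length
  decreasing_by simp; omega

theorem pvStepA_append (s : Int) (l1 l2 : List String) (st : Int × String × List String) :
    pvStepA s st (l1 ++ l2) = pvStepA s (pvStepA s st l1) l2 := by
  induction l1 generalizing st with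
  | nil => simp [pvStepA]
  | cons x rest ih =>
    obtain ⟨i, m1, acc⟩ := st
    simp only [List.cons_append, pvStepA]
    split_ifs <;> exact ih _

-- A's inner loop is pvStepA run on the months B's collector yields for that year.
theorem pvAInner_eq_stepA (sy ey sm em ss y : Int) (ms : List Int)
    (st : Int × String × List String) :
    pvAInner sy ey sm em ss y ms st = pvStepA ss st (pvBMonths sy ey sm em y ms) := by
  induction ms generalizing st with
  | nil => simp [pvAInner, pvBMonths, pvStepA]
  | cons m rest ih =>
    obtain ⟨i, m1, acc⟩ := st
    simp only [pvAInner, pvBMonths]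
    by_cases a : y = sy ∧ m < sm
    · rw [if_pos a, if_pos a]
      exact ih _
    · rw [if_neg a, if_neg a]
      by_cases b : y = ey ∧ m > em
      · rw [if_pos b, if_pos b]
        simp [pvStepA]
      · rw [if_neg b, if_neg b]
        simp only [pvStepA, ih]

-- the whole year fold of A is pvStepA run on B's flat months list.
theorem pvFold_eq_stepA (sy ey sm em ss : Int) (years : List Int)
    (st : Int × String × List String) :
    years.foldl (fun st y => pvAInner sy ey sm em ss y (PySem.List.pyRange 1 13 1) st) st
      = pvStepA ss st
          (years.flatMap (fun y => pvBMonths sy ey sm em y (PySem.List.pyRange 1 13 1))) := by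
  induction years generalizing st with
  | nil => simp [pvStepA]
  | cons y ys ih =>
    simp only [List.foldl_cons, List.flatMap_cons]
    rw [ih, pvAInner_eq_stepA, ← pvStepA_append]

-- step_size < 1: i stays ≥ 1 and never equals step_size, so nothing is ever appended.
theorem pvStepA_nonpos (s : Int) (hs : s < 1) (L : List String) :
    ∀ (i : Int) (m1 : String) (acc : List String), 1 ≤ i →
      (pvStepA s (i, m1, acc) L).2.2 = acc := by
  induction L with
  | nil => intro i m1 acc _; simp [pvStepA]
  | cons x rest ih =>
    intro i m1 acc hi
    simp only [pvStepA]
    rw [if_neg (by omega)]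
    exact ih _ _ _ (by omega)

-- consuming the rest of the current chunk: (s - i + 1) more elements are needed.
theorem pvStepA_consume (s : Int) :
    ∀ (L : List String) (i : Int) (m1 : String) (acc : List String), 1 ≤ i → i ≤ s →
      ((s - i + 1).toNat ≤ L.length →
        pvStepA s (i, m1, acc) L
          = pvStepA s
              (1, (if i = 1 then L.headI else m1),
               ((if i = 1 then L.headI else m1) ++ "_" ++ L.getD (s - i).toNat "") :: acc)
              (L.drop (s - i + 1).toNat)) ∧
      (L.length < (s - i + 1).toNat → (pvStepA s (i, m1, acc) L).2.2 = acc) := by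
  intro L
  induction L with
  | nil =>
    intro i m1 acc hi his
    constructor
    · intro h; simp at h; omega
    · intro _; simp [pvStepA]
  | cons x rest ih =>
    intro i m1 acc hi his
    by_cases heq : i = s
    · -- this element closes the chunk
      have h1 : (s - i + 1).toNat = 1 := by omega
      have h0 : (s - i).toNat = 0 := by omega
      rw [h1, h0]
      constructor
      · intro _
        simp only [pvStepA, if_pos heq]
        simp
      · intro h; simp at h
    · -- consume x and recurse at i + 1
      have hlt : i < s := lt_of_le_of_ne his heq
      have hrec := ih (i + 1) (if i = 1 then x else m1) acc (by omega) (by omega)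
      have e1 : (s - (i + 1) + 1).toNat = (s - i).toNat := by omega
      have e2 : (s - i + 1).toNat = (s - i).toNat + 1 := by omega
      have e3 : ¬ (i + 1 = 1) := by omega
      rw [e1] at hrec
      constructor
      · intro hlen
        simp only [pvStepA, if_neg heq]
        rw [hrec.1 (by simp at hlen; omega), if_neg e3]
        have e0 : (s - (i + 1)).toNat = (s - i).toNat - 1 := by omega
        have hgd : rest.getD ((s - i).toNat - 1) "" = (x :: rest).getD (s - i).toNat "" := by
          have h' : (s - i).toNat = ((s - i).toNat - 1) + 1 := by omega
          rw [h']
          simp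
        rw [e0, e2, hgd]
        simp
      · intro hlen
        simp only [pvStepA, if_neg heq]
        rw [hrec.2 (by simp at hlen ⊢; omega)]

-- the A-machine started at i = 1 produces exactly the complete-chunk labels (reversed).
theorem pvStepA_chunks (s : Int) (hs : 1 ≤ s) :
    ∀ (n : Nat) (L : List String), L.length ≤ n → ∀ (m1 : String) (acc : List String),
      (pvStepA s (1, m1, acc) L).2.2 = (pvChunks s.toNat L).reverse ++ acc := by
  intro n
  induction n with
  | zero =>
    intro L hL m1 acc
    have : L = [] := List.length_eq_zero_iff.mp (by omega)
    subst this
    rw [pvChunks, dif_neg (by simp)]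
    simp [pvStepA]
  | succ n ihn =>
    intro L hL m1 acc
    have hcons := pvStepA_consume s L 1 m1 acc (le_refl 1) hs
    have e1 : (s - 1 + 1).toNat = s.toNat := by omega
    have e2 : (s - 1).toNat = s.toNat - 1 := by omega
    rw [e1, e2] at hcons
    by_cases hlen : s.toNat ≤ L.length
    · rw [hcons.1 hlen, if_pos rfl]
      have hdrop : (L.drop s.toNat).length ≤ n := by simp; omega
      rw [ihn _ hdrop]
      conv_rhs => rw [pvChunks]
      rw [dif_pos ⟨by omega, hlen⟩]
      simp
    · rw [hcons.2 (by omega), pvChunks, dif_neg (by omega)]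
      simp

-- peeling one element off a positive-step range.
theorem pvPyRange_pos_cons (a b s : Int) (hs : 0 < s) (h : a < b) :
    PySem.List.pyRange a b s = a :: PySem.List.pyRange (a + s) b s := by
  rw [PySem.List.pyRange_of_pos _ _ hs, PySem.List.pyRange_of_pos _ _ hs]
  rw [if_pos h]
  by_cases h2 : a + s < b
  · rw [if_pos h2]
    have e1 : b - a + s - 1 = (b - (a + s) + s - 1) + 1 * s := by ring
    have e2 : ((b - a + s - 1) / s) = (b - (a + s) + s - 1) / s + 1 := by
      rw [e1, Int.add_mul_ediv_right _ _ (by omega : s ≠ 0)]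
    have hpos : 0 ≤ (b - (a + s) + s - 1) / s :=
      Int.ediv_nonneg (by omega) (by omega)
    have e3 : ((b - a + s - 1) / s).toNat = ((b - (a + s) + s - 1) / s).toNat + 1 := by
      omega
    rw [e3, List.range_succ_eq_map]
    simp only [List.map_cons, List.map_map]
    congr 1
    · simp
    apply List.map_congr_left
    intro k _
    simp only [Function.comp, Nat.succ_eq_add_one]
    push_cast
    ring
  · rw [if_neg h2]
    have e1 : (b - a + s - 1) = (b - a - 1) + 1 * s := by ring
    have e4 : (b - a + s - 1) / s = 1 := by
      rw [e1, Int.add_mul_ediv_right _ _ (by omega : s ≠ 0),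
        Int.ediv_eq_zero_of_lt (by omega) (by omega)]
      norm_num
    rw [e4]
    simp

theorem pvPyRange_pos_nil (a b s : Int) (hs : 0 < s) (h : b ≤ a) :
    PySem.List.pyRange a b s = [] := by
  rw [PySem.List.pyRange_of_pos _ _ hs, if_neg (by omega)]
  simp

-- shifting a stepped range starting at its own step down to one starting at 0.
theorem pvRange_shift (b s : Int) (hs : 0 < s) :
    PySem.List.pyRange s b s = (PySem.List.pyRange 0 (b - s) s).map (fun j => j + s) := by
  rw [PySem.List.pyRange_of_pos _ _ hs, PySem.List.pyRange_of_pos _ _ hs, List.map_map]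
  have h1 : (if s < b then ((b - s + s - 1) / s).toNat else 0)
      = (if 0 < b - s then ((b - s - 0 + s - 1) / s).toNat else 0) := by
    by_cases h : s < b
    · rw [if_pos h, if_pos (by omega)]
      congr 2
      omega
    · rw [if_neg h, if_neg (by omega)]
  rw [h1]
  apply List.map_congr_left
  intro k _
  simp only [Function.comp_apply]
  ring

-- two maps over the same positive-step range from 0 agree if the functions agree on
-- the multiples of the step.
theorem pvMapRange (c s : Int) (hs : 0 < s) (f g : Int → String)
    (h : ∀ k : Nat, f (s * k) = g (s * k)) :
    (PySem.List.pyRange 0 c s).map f = (PySem.List.pyRange 0 c s).map g := by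
  rw [PySem.List.pyRange_of_pos _ _ hs, List.map_map, List.map_map]
  apply List.map_congr_left
  intro k _
  simp only [Function.comp_apply, zero_add]
  exact h k

-- indexing into a dropped prefix shifts the (nonnegative) index.
theorem pvGetD_drop (L : List String) (m : Nat) (j : Int) (d : String) (hj : 0 ≤ j) :
    PySem.List.pyGetD (L.drop m) j d = PySem.List.pyGetD L (j + m) d := by
  obtain ⟨k, rfl⟩ : ∃ k : Nat, j = (k : Int) := ⟨j.toNat, (Int.toNat_of_nonneg hj).symm⟩
  have hc : (k : Int) + m = ((k + m : Nat) : Int) := by push_cast; ring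
  rw [PySem.List.pyGetD_natCast, hc, PySem.List.pyGetD_natCast,
    List.getD_eq_getElem?_getD, List.getD_eq_getElem?_getD, Nat.add_comm k m,
    List.getElem?_drop]

-- Source B's chunking map over the stepped index range is exactly pvChunks.
theorem pvChunkMap (s : Int) (hs : 1 ≤ s) :
    ∀ (n : Nat) (L : List String), L.length ≤ n →
      (PySem.List.pyRange 0 ((L.length : Int) - s + 1) s).map
          (fun j => PySem.List.pyGetD L j "" ++ "_" ++ PySem.List.pyGetD L (j + s - 1) "")
        = pvChunks s.toNat L := by
  intro n
  induction n with
  | zero =>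
    intro L hL
    have : L = [] := List.length_eq_zero_iff.mp (by omega)
    subst this
    rw [pvChunks, dif_neg (by simp)]
    simp only [List.length_nil, Nat.cast_zero]
    rw [pvPyRange_pos_nil _ _ _ (by omega) (by omega)]
    simp
  | succ n ih =>
    intro L hL
    by_cases hlen : s ≤ (L.length : Int)
    · rw [pvPyRange_pos_cons 0 ((L.length : Int) - s + 1) s (by omega) (by omega),
        List.map_cons]
      conv_rhs => rw [pvChunks]
      rw [dif_pos ⟨by omega, by omega⟩]
      congr 1
      · -- the head chunk label
        have hhead : PySem.List.pyGetD L 0 "" = L.headI := by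
          cases L with
          | nil => simp at hlen; omega
          | cons x t => rw [PySem.List.pyGetD_zero_cons]; rfl
        have hidx : (0 : Int) + s - 1 = ((s.toNat - 1 : Nat) : Int) := by omega
        rw [hhead, hidx, PySem.List.pyGetD_natCast]
      · -- the remaining chunks over the dropped list
        rw [zero_add, pvRange_shift ((L.length : Int) - s + 1) s (by omega), List.map_map]
        have ih' := ih (L.drop s.toNat) (by simp; omega)
        have harg : ((L.drop s.toNat).length : Int) - s + 1 = (L.length : Int) - s + 1 - s := by
          rw [List.length_drop]
          omega
        rw [harg] at ih'
        rw [← ih']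
        apply pvMapRange _ s (by omega)
        intro k
        have hj : 0 ≤ s * (k : Int) := mul_nonneg (by omega) (Int.natCast_nonneg k)
        generalize s * (k : Int) = j at hj ⊢
        simp only [Function.comp_apply]
        rw [pvGetD_drop L s.toNat j "" hj, pvGetD_drop L s.toNat (j + s - 1) "" (by omega)]
        have hcast : ((s.toNat : Nat) : Int) = s := by omega
        rw [hcast, show j + s - 1 + s = j + s + s - 1 by ring]
    · rw [pvPyRange_pos_nil _ _ _ (by omega) (by omega), pvChunks, dif_neg (by omega)]
      simp

-- ===== VERDICT (by name: the statement is the Claim_ definition above) =====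
theorem get_time_slices_spec : Claim_equal_get_time_slices := by
  intro sy ey sm em ss _
  unfold Spec_get_time_slices get_time_slices get_time_slices_alt pvBAllMonths
  simp only [PySem.List.len_eq]
  rw [pvFold_eq_stepA]
  by_cases hss : ss < 1
  · rw [if_pos hss, pvStepA_nonpos ss hss _ 1 "" [] (le_refl 1)]
    simp
  · rw [if_neg hss,
      pvStepA_chunks ss (by omega) _ _ (le_refl _) "" [],
      List.append_nil, List.reverse_reverse,
      ← pvChunkMap ss (by omega) _ _ (le_refl _)]
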